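-- pv_equiv track=rewrite | github.com/deevredd/Modulus-AI | tools/base_tool.py | summarize_context_quality
-- ===== SOURCE A (Python) =====
-- def summarize_context_quality(context: str) -> dict:
--     """
--     Return basic retrieval quality metrics.
--
--     - total_chars: full payload size
--     - fallback_chars: characters coming from fallback metadata blocks
--     - usable_chars: best-effort estimate of real extracted body text
--     """
--     text = str(context or "")
--     fallback_tag = "[Fallback metadata only:"
--     fallback_chars = 0
--     scan_idx = 0
--
--     while True:
--         start = text.find(fallback_tag, scan_idx)
--         if start == -1:
--             break
--         end = text.find("\n", start)
--         if end == -1: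
--             end = len(text)
--         fallback_chars += (end - start)
--         scan_idx = end
--
--     total_chars = len(text)
--     usable_chars = max(0, total_chars - fallback_chars)
--     return {
--         "total_chars": total_chars,
--         "fallback_chars": fallback_chars,
--         "usable_chars": usable_chars,
--     }
-- ===== SOURCE B (Python) =====
-- def summarize_context_quality(context: str) -> dict:
--     text = str(context or "")
--     fallback_tag = "[Fallback metadata only:"
--     fallback_chars = 0
--     for line in text.split("\n"):
--         idx = line.find(fallback_tag)
--         if idx != -1:
--             fallback_chars += len(line) - idx
--     total_chars = len(text)
--     return {
--         "total_chars": total_chars,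
--         "fallback_chars": fallback_chars,
--         "usable_chars": max(0, total_chars - fallback_chars),
--     }
-- ===== Notes on version B (the rewrite author's own statement) =====
-- stated objective: simpler
-- what changed: Replaced A's manual while-loop that advances a scan index through repeated str.find calls with a single for-loop over the list of lines of the text, doing one find per line, which yields the same per-line first-tag counts.
import Mathlib
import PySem

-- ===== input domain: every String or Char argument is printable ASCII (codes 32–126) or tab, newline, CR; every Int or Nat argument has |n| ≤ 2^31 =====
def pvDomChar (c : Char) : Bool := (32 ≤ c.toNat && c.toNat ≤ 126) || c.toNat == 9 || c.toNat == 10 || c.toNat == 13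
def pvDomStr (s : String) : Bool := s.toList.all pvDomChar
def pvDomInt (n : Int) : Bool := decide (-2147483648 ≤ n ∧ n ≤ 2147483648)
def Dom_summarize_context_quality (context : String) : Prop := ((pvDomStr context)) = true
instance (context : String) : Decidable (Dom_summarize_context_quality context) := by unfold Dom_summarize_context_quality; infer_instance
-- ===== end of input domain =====

-- B replaces A's while-loop of index-advancing str.find scans by one find per line of text.split('\n'); objective: simpler.

-- the fallback tag, shared verbatim by both programs
def pvTag : List Char := "[Fallback metadata only:".toList

-- ===== PORT A =====
-- A's 'while True' scan; fuel = text.length + 1 bounds the iterations (scan_idx strictly increases)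
def pvALoop (text : List Char) (fuel : Nat) (scanIdx : Int) (acc : Int) : Int :=
  match fuel with
  | 0 => acc
  | Nat.succ fuel =>
    let start := PySem.Chars.findFrom text pvTag scanIdx
    if start = -1 then acc
    else
      let e0 := PySem.Chars.findFrom text ['\n'] start
      let e := if e0 = -1 then (text.length : Int) else e0
      pvALoop text fuel e (acc + (e - start))

def summarize_context_quality (context : String) : List (String × Int) :=
  let text := context.toList            -- str(context or "") is context itself (also when empty)
  let fallback_chars := pvALoop text (text.length + 1) 0 0
  let total_chars : Int := text.length
  let usable_chars := max 0 (total_chars - fallback_chars)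
  [("total_chars", total_chars), ("fallback_chars", fallback_chars), ("usable_chars", usable_chars)]

-- ===== PORT B =====
def summarize_context_quality_alt (context : String) : List (String × Int) :=
  let text := context.toList            -- str(context or "") is context itself (also when empty)
  let fallback_chars :=
    (PySem.Chars.splitOn text ['\n']).foldl
      (fun acc line =>
        let idx := PySem.Chars.find line pvTag
        if idx ≠ -1 then acc + ((line.length : Int) - idx) else acc) 0
  let total_chars : Int := text.length
  [("total_chars", total_chars), ("fallback_chars", fallback_chars),
   ("usable_chars", max 0 (total_chars - fallback_chars))]

-- ===== PRECONDITION & SPEC =====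
def Spec_summarize_context_quality (context : String) (out : List (String × Int)) : Prop := out = summarize_context_quality_alt context
instance (context : String) (out : List (String × Int)) : Decidable (Spec_summarize_context_quality context out) := by unfold Spec_summarize_context_quality; infer_instance

-- ===== CLAIM (what is proved, stated in full; the proofs are below) =====
def Claim_equal_summarize_context_quality : Prop := ∀ (context : String), Dom_summarize_context_quality context → Spec_summarize_context_quality context (summarize_context_quality context)

-- ===== LEMMAS AND PROOFS =====

lemma pvTag_ne_nil : pvTag ≠ [] := by decide
lemma pv_nl_not_mem_tag : '\n' ∉ pvTag := by decide

lemma pv_infix_iff (t s : List Char) : t <:+: s ↔ ∃ j, t <+: s.drop j := by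
  rw [← PySem.Chars.isIn_iff_infix, ← PySem.Chars.exists_prefix_drop_iff_isIn]

lemma pv_prefix_nl (t a b : List Char) (h : '\n' ∉ t) :
    t <+: a ++ '\n' :: b ↔ (t <+: a ∨ t = []) := by
  constructor
  · intro hp
    by_cases hl : t.length ≤ a.length
    · left
      have := List.prefix_iff_eq_take.1 hp
      rw [List.take_append_of_le_length hl] at this
      exact this ▸ List.take_prefix _ _
    · exfalso
      apply h
      have := List.prefix_iff_eq_take.1 hp
      rw [List.take_append] at this
      have hk : t.length - a.length = (t.length - a.length - 1) + 1 := by omega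
      rw [this]
      refine List.mem_append_right _ ?_
      rw [hk, List.take_succ_cons]
      simp
  · rintro (hp | rfl)
    · exact hp.trans (List.prefix_append _ _)
    · exact List.nil_prefix
lemma pv_infix_nl (t a b : List Char) (h : '\n' ∉ t) :
    t <:+: a ++ '\n' :: b ↔ (t <:+: a ∨ t <:+: b) := by
  by_cases ht : t = []
  · subst ht; simp
  constructor
  · intro hi
    rw [pv_infix_iff] at hi
    obtain ⟨j, hj⟩ := hi
    by_cases hja : j ≤ a.length
    · rw [List.drop_append_of_le_length hja] at hj
      rcases (pv_prefix_nl t _ b h).1 hj with hp | rfl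
      · exact Or.inl (hp.isInfix.trans (List.drop_suffix _ _).isInfix)
      · simp at ht
    · right
      rw [List.drop_append, List.drop_of_length_le (by omega)] at hj
      have : List.drop (j - a.length) ('\n' :: b) = List.drop (j - a.length - 1) b := by
        have : j - a.length = (j - a.length - 1) + 1 := by omega
        rw [this]; rfl
      rw [this] at hj
      simp only [List.nil_append] at hj
      rw [pv_infix_iff]
      exact ⟨_, hj⟩
  · rintro (hi | hi)
    · exact hi.trans ⟨[], '\n' :: b, by simp⟩
    · exact hi.trans ⟨a ++ ['\n'], [], by simp⟩

lemma pv_find_eq (s t : List Char) (k : Nat) (h1 : t <+: s.drop k)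
    (h2 : ∀ i < k, ¬ t <+: s.drop i) : PySem.Chars.find s t = k := by
  have hinf : t <:+: s := (pv_infix_iff t s).2 ⟨k, h1⟩
  have hnn : 0 ≤ PySem.Chars.find s t := (PySem.Chars.find_nonneg_iff s t).2 hinf
  obtain ⟨hp, hmin⟩ := PySem.Chars.find_spec hnn
  rcases lt_trichotomy (PySem.Chars.find s t).toNat k with hlt | heq | hgt
  · exact absurd hp (h2 _ hlt)
  · omega
  · exact absurd h1 (hmin k hgt)

lemma pv_find_nil_tag : PySem.Chars.find [] pvTag = -1 := by decide

lemma pv_find_tag_left (l r : List Char) (h : PySem.Chars.find l pvTag ≠ -1) :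
    PySem.Chars.find (l ++ '\n' :: r) pvTag = PySem.Chars.find l pvTag := by
  have hnn : 0 ≤ PySem.Chars.find l pvTag := by
    have := PySem.Chars.neg_one_le_find l pvTag; omega
  obtain ⟨hp, hmin⟩ := PySem.Chars.find_spec hnn
  set pn := (PySem.Chars.find l pvTag).toNat with hpn
  have hple : pn ≤ l.length := by
    have := PySem.Chars.find_le_length l pvTag; omega
  have h1 : pvTag <+: (l ++ '\n' :: r).drop pn := by
    rw [List.drop_append_of_le_length hple]
    exact hp.trans (List.prefix_append _ _)
  have h2 : ∀ i < pn, ¬ pvTag <+: (l ++ '\n' :: r).drop i := by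
    intro i hi hc
    rw [List.drop_append_of_le_length (by omega)] at hc
    rcases (pv_prefix_nl _ _ _ pv_nl_not_mem_tag).1 hc with hc | hc
    · exact hmin i hi hc
    · exact pvTag_ne_nil hc
  rw [pv_find_eq _ _ pn h1 h2]; omega

lemma pv_find_tag_right (l r : List Char) (h : PySem.Chars.find l pvTag = -1) :
    PySem.Chars.find (l ++ '\n' :: r) pvTag =
      if PySem.Chars.find r pvTag = -1 then -1
      else (l.length : Int) + 1 + PySem.Chars.find r pvTag := by
  have hnl : ¬ pvTag <:+: l := (PySem.Chars.find_eq_neg_one_iff l pvTag).1 h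
  split
  · rename_i hr
    rw [PySem.Chars.find_eq_neg_one_iff]
    rw [pv_infix_nl _ _ _ pv_nl_not_mem_tag]
    rintro (hc | hc)
    · exact hnl hc
    · exact (PySem.Chars.find_eq_neg_one_iff r pvTag).1 hr hc
  · rename_i hr
    have hnn : 0 ≤ PySem.Chars.find r pvTag := by
      have := PySem.Chars.neg_one_le_find r pvTag; omega
    obtain ⟨hp, hmin⟩ := PySem.Chars.find_spec hnn
    set pn := (PySem.Chars.find r pvTag).toNat with hpn
    have h1 : pvTag <+: (l ++ '\n' :: r).drop (l.length + 1 + pn) := by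
      have : (l ++ '\n' :: r).drop (l.length + 1 + pn) = r.drop pn := by
        rw [List.drop_append, List.drop_of_length_le (by omega)]
        have h2 : l.length + 1 + pn - l.length = pn + 1 := by omega
        simp [h2]
      rw [this]; exact hp
    have h2 : ∀ i < l.length + 1 + pn, ¬ pvTag <+: (l ++ '\n' :: r).drop i := by
      intro i hi hc
      by_cases hia : i ≤ l.length
      · rw [List.drop_append_of_le_length hia] at hc
        rcases (pv_prefix_nl _ _ _ pv_nl_not_mem_tag).1 hc with hc | hc
        · exact hnl (hc.isInfix.trans (List.drop_suffix _ _).isInfix)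
        · exact pvTag_ne_nil hc
      · have : (l ++ '\n' :: r).drop i = r.drop (i - l.length - 1) := by
          rw [List.drop_append, List.drop_of_length_le (by omega)]
          have hh : i - l.length = (i - l.length - 1) + 1 := by omega
          rw [hh]; rfl
        rw [this] at hc
        exact hmin _ (by omega) hc
    rw [pv_find_eq _ _ (l.length + 1 + pn) h1 h2]
    push_cast
    omega

lemma pv_find_nl_none (s : List Char) (h : '\n' ∉ s) : PySem.Chars.find s ['\n'] = -1 := by
  rw [PySem.Chars.find_eq_neg_one_iff]
  intro hc
  exact h (hc.subset (by simp))

lemma pv_find_nl (a r : List Char) (h : '\n' ∉ a) :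
    PySem.Chars.find (a ++ '\n' :: r) ['\n'] = a.length := by
  have h1 : ['\n'] <+: (a ++ '\n' :: r).drop a.length := by
    rw [List.drop_append_of_le_length le_rfl]
    simp
  have h2 : ∀ i < a.length, ¬ ['\n'] <+: (a ++ '\n' :: r).drop i := by
    intro i hi hc
    apply h
    rw [List.drop_append_of_le_length (by omega)] at hc
    have hne : a.drop i ≠ [] := by
      intro hh; rw [List.drop_eq_nil_iff] at hh; omega
    have : (a.drop i).head? = some '\n' := by
      cases hd : a.drop i with
      | nil => exact absurd hd hne
      | cons x xs =>
        rw [hd] at hc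
        obtain ⟨tl, htl⟩ := hc
        simp only [List.cons_append, List.nil_append, List.cons.injEq] at htl
        simp [htl.1.symm]
    have : '\n' ∈ a.drop i := by
      cases hd : a.drop i with
      | nil => exact absurd hd hne
      | cons x xs => rw [hd] at this; simp at this; simp [this]
    exact (List.drop_sublist _ _).mem this
  exact pv_find_eq _ _ a.length h1 h2

def pvLineCount (line : List Char) : Int :=
  let idx := PySem.Chars.find line pvTag
  if idx ≠ -1 then (line.length : Int) - idx else 0

def pvF : Nat → List Char → Int
  | 0, _ => 0
  | Nat.succ fuel, s =>
    let p := PySem.Chars.find s pvTag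
    if p = -1 then 0
    else
      let q := PySem.Chars.findFrom s ['\n'] p
      let e := if q = -1 then s.length else q.toNat
      ((e : Int) - p) + pvF fuel (s.drop e)

lemma pvF_nil (fuel : Nat) : pvF fuel [] = 0 := by
  cases fuel with
  | zero => rfl
  | succ fuel => simp [pvF, pv_find_nil_tag]

lemma pvF_skip (fuel : Nat) (l r : List Char) (_h1 : '\n' ∉ l)
    (h2 : PySem.Chars.find l pvTag = -1) : pvF fuel (l ++ '\n' :: r) = pvF fuel r := by
  cases fuel with
  | zero => rfl
  | succ fuel =>
    by_cases hr : PySem.Chars.find r pvTag = -1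
    · have hs : PySem.Chars.find (l ++ '\n' :: r) pvTag = -1 := by
        rw [pv_find_tag_right l r h2, if_pos hr]
      simp [pvF, hs, hr]
    · have hnn : 0 ≤ PySem.Chars.find r pvTag := by
        have := PySem.Chars.neg_one_le_find r pvTag; omega
      set pn := (PySem.Chars.find r pvTag).toNat with hpn
      have hple : pn ≤ r.length := by
        have := PySem.Chars.find_le_length r pvTag; omega
      have hrpn : PySem.Chars.find r pvTag = ((pn : Nat) : Int) := by omega
      have hs : PySem.Chars.find (l ++ '\n' :: r) pvTag = ((l.length + 1 + pn : Nat) : Int) := by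
        rw [pv_find_tag_right l r h2, if_neg hr]; push_cast; omega
      have hdropeq : (l ++ '\n' :: r).drop (l.length + 1 + pn) = r.drop pn := by
        rw [List.drop_append, List.drop_of_length_le (by omega)]
        have hh : l.length + 1 + pn - l.length = pn + 1 := by omega
        simp [hh]
      have hqs : PySem.Chars.findFrom (l ++ '\n' :: r) ['\n'] ((l.length + 1 + pn : Nat) : Int)
          = if PySem.Chars.find (r.drop pn) ['\n'] = -1 then -1
            else ((l.length + 1 + pn : Nat) : Int) + PySem.Chars.find (r.drop pn) ['\n'] := by
        rw [PySem.Chars.findFrom_natCast _ _ _ (by simp; omega), hdropeq]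
      have hqr : PySem.Chars.findFrom r ['\n'] ((pn : Nat) : Int)
          = if PySem.Chars.find (r.drop pn) ['\n'] = -1 then -1
            else ((pn : Nat) : Int) + PySem.Chars.find (r.drop pn) ['\n'] :=
        PySem.Chars.findFrom_natCast _ _ _ hple
      simp only [pvF]
      rw [hs, hrpn, hqs, hqr]
      rw [if_neg (show ¬((l.length + 1 + pn : Nat) : Int) = -1 from by omega)]
      rw [if_neg (show ¬((pn : Nat) : Int) = -1 from by omega)]
      by_cases hd : PySem.Chars.find (r.drop pn) ['\n'] = -1
      · simp only [if_pos hd]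
        norm_num [List.drop_length, pvF_nil]
        omega
      · have hdnn : 0 ≤ PySem.Chars.find (r.drop pn) ['\n'] := by
          have := PySem.Chars.neg_one_le_find (r.drop pn) ['\n']; omega
        set dn := (PySem.Chars.find (r.drop pn) ['\n']).toNat with hdn
        simp only [if_neg hd]
        rw [if_neg (show ¬((l.length + 1 + pn : Nat) : Int) + PySem.Chars.find (r.drop pn) ['\n'] = -1 from by omega)]
        rw [if_neg (show ¬((pn : Nat) : Int) + PySem.Chars.find (r.drop pn) ['\n'] = -1 from by omega)]
        have he1 : (((l.length + 1 + pn : Nat) : Int) + PySem.Chars.find (r.drop pn) ['\n']).toNat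
            = l.length + 1 + (pn + dn) := by omega
        have he2 : (((pn : Nat) : Int) + PySem.Chars.find (r.drop pn) ['\n']).toNat = pn + dn := by omega
        rw [he1, he2]
        have hdr : (l ++ '\n' :: r).drop (l.length + 1 + (pn + dn)) = r.drop (pn + dn) := by
          rw [List.drop_append, List.drop_of_length_le (by omega)]
          have hh : l.length + 1 + (pn + dn) - l.length = (pn + dn) + 1 := by omega
          simp [hh]
        rw [hdr]
        omega

lemma pvF_tag (fuel : Nat) (l r : List Char) (h1 : '\n' ∉ l)
    (h2 : PySem.Chars.find l pvTag ≠ -1) :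
    pvF (fuel + 1) (l ++ '\n' :: r) = ((l.length : Int) - PySem.Chars.find l pvTag) + pvF fuel r := by
  have hnn : 0 ≤ PySem.Chars.find l pvTag := by
    have := PySem.Chars.neg_one_le_find l pvTag; omega
  set pn := (PySem.Chars.find l pvTag).toNat with hpn
  have hple : pn ≤ l.length := by
    have := PySem.Chars.find_le_length l pvTag; omega
  have hlpn : PySem.Chars.find l pvTag = ((pn : Nat) : Int) := by omega
  have hs : PySem.Chars.find (l ++ '\n' :: r) pvTag = ((pn : Nat) : Int) := by
    rw [pv_find_tag_left l r h2, hlpn]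
  have hnodrop : '\n' ∉ l.drop pn := fun hc => h1 ((List.drop_suffix _ _).subset hc)
  have hdropeq : (l ++ '\n' :: r).drop pn = l.drop pn ++ '\n' :: r :=
    List.drop_append_of_le_length hple
  have hfd : PySem.Chars.find ((l ++ '\n' :: r).drop pn) ['\n'] = ((l.drop pn).length : Int) := by
    rw [hdropeq, pv_find_nl _ _ hnodrop]
  have hq : PySem.Chars.findFrom (l ++ '\n' :: r) ['\n'] ((pn : Nat) : Int)
      = (l.length : Int) := by
    rw [PySem.Chars.findFrom_natCast _ _ _ (by simp; omega), hfd]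
    rw [if_neg (show ¬((l.drop pn).length : Int) = -1 from by omega)]
    simp only [List.length_drop]
    omega
  simp only [pvF]
  rw [hs, if_neg (by omega), hq]
  rw [if_neg (by omega)]
  have htn : ((l.length : Int)).toNat = l.length := by omega
  rw [htn]
  have hdr : (l ++ '\n' :: r).drop l.length = '\n' :: r := by
    rw [List.drop_append_of_le_length le_rfl, List.drop_length]; rfl
  rw [hdr]
  have hsk : pvF fuel ('\n' :: r) = pvF fuel r := by
    have := pvF_skip fuel [] r (by simp) (by decide)
    simpa using this
  rw [hsk, hlpn]

lemma pvF_single (fuel : Nat) (s : List Char) (h : '\n' ∉ s) :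
    pvF (fuel + 1) s = pvLineCount s := by
  by_cases hp : PySem.Chars.find s pvTag = -1
  · simp [pvF, pvLineCount, hp]
  · have hnn : 0 ≤ PySem.Chars.find s pvTag := by
      have := PySem.Chars.neg_one_le_find s pvTag; omega
    set pn := (PySem.Chars.find s pvTag).toNat with hpn
    have hple : pn ≤ s.length := by
      have := PySem.Chars.find_le_length s pvTag; omega
    have hspn : PySem.Chars.find s pvTag = ((pn : Nat) : Int) := by omega
    have hnodrop : '\n' ∉ s.drop pn := fun hc => h ((List.drop_suffix _ _).subset hc)
    have hq : PySem.Chars.findFrom s ['\n'] ((pn : Nat) : Int) = -1 := by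
      rw [PySem.Chars.findFrom_natCast _ _ _ hple, pv_find_nl_none _ hnodrop, if_pos rfl]
    simp only [pvF, pvLineCount]
    rw [hspn, if_neg (by omega), hq, if_pos rfl, List.drop_length, pvF_nil]
    rw [if_pos (show ((pn : Nat) : Int) ≠ -1 from by omega)]
    omega

def pvLines : List Char → List (List Char)
  | [] => [[]]
  | c :: t =>
    if c = '\n' then [] :: pvLines t
    else
      match pvLines t with
      | [] => [[c]]
      | L :: Ls => (c :: L) :: Ls

lemma pvLines_ne_nil (s : List Char) : pvLines s ≠ [] := by
  induction s with
  | nil => simp [pvLines]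
  | cons c t ih =>
    simp only [pvLines]
    split
    · simp
    · cases h : pvLines t <;> simp

lemma pvLines_no_nl (s : List Char) (h : '\n' ∉ s) : pvLines s = [s] := by
  induction s with
  | nil => rfl
  | cons c t ih =>
    simp only [List.mem_cons, not_or] at h
    rw [pvLines, if_neg (fun hh => h.1 hh.symm), ih h.2]

lemma pvLines_append (l r : List Char) (h : '\n' ∉ l) :
    pvLines (l ++ '\n' :: r) = l :: pvLines r := by
  induction l with
  | nil => simp [pvLines]
  | cons c t ih =>
    simp only [List.mem_cons, not_or] at h
    rw [List.cons_append, pvLines, if_neg (fun hh => h.1 hh.symm), ih h.2]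

lemma pv_splitOn_go (fuel : Nat) : ∀ (l cur : List Char) (acc : List (List Char)), l.length ≤ fuel →
    PySem.Chars.splitOn.go ['\n'] fuel l cur acc =
      acc.reverse ++ (match pvLines l with
        | [] => []
        | L :: Ls => (cur.reverse ++ L) :: Ls) := by
  induction fuel with
  | zero =>
    intro l cur acc h
    rw [Nat.le_zero, List.length_eq_zero_iff] at h
    subst h
    rw [PySem.Chars.splitOn.go]
    simp [pvLines]
  | succ fuel ih =>
    intro l cur acc h
    match l with
    | [] => rw [PySem.Chars.splitOn.go] <;> simp [pvLines]
    | c :: rest =>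
      rw [PySem.Chars.splitOn.go]
      by_cases hc : c = '\n'
      · subst hc
        rw [if_pos (by simp)]
        rw [ih _ _ _ (by simpa using Nat.le_of_succ_le_succ h)]
        simp only [pvLines]
        cases hE : pvLines rest with
        | nil => exact absurd hE (pvLines_ne_nil rest)
        | cons L Ls => simp [hE]
      · rw [if_neg (by simp; exact fun hh => hc hh.symm)]
        rw [ih _ _ _ (by simpa using Nat.le_of_succ_le_succ h)]
        simp only [pvLines, if_neg hc]
        cases hE : pvLines rest with
        | nil => exact absurd hE (pvLines_ne_nil rest)
        | cons L Ls => simp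

lemma pv_splitOn_eq (s : List Char) : PySem.Chars.splitOn s ['\n'] = pvLines s := by
  show PySem.Chars.splitOn.go ['\n'] (s.length + 1) s [] [] = _
  rw [pv_splitOn_go (s.length + 1) s [] [] (by omega)]
  cases hE : pvLines s with
  | nil => exact absurd hE (pvLines_ne_nil s)
  | cons L Ls => simp

def pvG (L : List (List Char)) : Int := (L.map pvLineCount).sum

lemma pv_split_at_nl (s : List Char) (h : '\n' ∈ s) :
    ∃ l r, s = l ++ '\n' :: r ∧ '\n' ∉ l := by
  induction s with
  | nil => simp at h
  | cons c t ih =>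
    by_cases hc : c = '\n'
    · exact ⟨[], t, by simp [hc], by simp⟩
    · have ht : '\n' ∈ t := by
        rcases List.mem_cons.1 h with hh | hh
        · exact absurd hh.symm hc
        · exact hh
      obtain ⟨l, r, hlr, hnl⟩ := ih ht
      exact ⟨c :: l, r, by simp [hlr], by simp [hnl]; exact fun hh => hc hh.symm⟩

lemma pv_main (n : Nat) : ∀ (s : List Char) (fuel : Nat), s.length ≤ n → s.length < fuel →
    pvF fuel s = pvG (pvLines s) := by
  induction n using Nat.strong_induction_on with
  | _ n ih =>
    intro s fuel hn hfuel
    by_cases hnl : '\n' ∈ s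
    · obtain ⟨l, r, rfl, hlnl⟩ := pv_split_at_nl s hnl
      have hlen : (l ++ '\n' :: r).length = l.length + 1 + r.length := by simp; omega
      rw [pvLines_append l r hlnl]
      by_cases htag : PySem.Chars.find l pvTag = -1
      · rw [pvF_skip fuel l r hlnl htag]
        have hr : pvF fuel r = pvG (pvLines r) := by
          rcases Nat.eq_zero_or_pos n with hz | hpos
          · omega
          · exact ih (n - 1) (by omega) r fuel (by omega) (by omega)
        rw [hr]
        simp [pvG, pvLineCount, htag]
      · obtain ⟨fuel', rfl⟩ : ∃ fuel', fuel = fuel' + 1 := ⟨fuel - 1, by omega⟩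
        rw [pvF_tag fuel' l r hlnl htag]
        have hr : pvF fuel' r = pvG (pvLines r) := by
          rcases Nat.eq_zero_or_pos n with hz | hpos
          · omega
          · exact ih (n - 1) (by omega) r fuel' (by omega) (by omega)
        rw [hr]
        simp only [pvG, List.map_cons, List.sum_cons, pvLineCount]
        rw [if_pos htag]
    · rw [pvLines_no_nl s hnl]
      obtain ⟨fuel', rfl⟩ : ∃ fuel', fuel = fuel' + 1 := ⟨fuel - 1, by omega⟩
      rw [pvF_single fuel' s hnl]
      simp [pvG]

lemma pv_bridge (fuel : Nat) : ∀ (text : List Char) (k : Nat) (acc : Int), k ≤ text.length →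
    pvALoop text fuel (k : Int) acc = acc + pvF fuel (text.drop k) := by
  induction fuel with
  | zero => intro text k acc hk; simp [pvALoop, pvF]
  | succ fuel ih =>
    intro text k acc hk
    simp only [pvALoop, pvF]
    rw [PySem.Chars.findFrom_natCast text pvTag k hk]
    by_cases hp : PySem.Chars.find (text.drop k) pvTag = -1
    · simp [if_pos hp]
    · have hnn : 0 ≤ PySem.Chars.find (text.drop k) pvTag := by
        have := PySem.Chars.neg_one_le_find (text.drop k) pvTag; omega
      have hlep : PySem.Chars.find (text.drop k) pvTag ≤ ((text.drop k).length : Int) :=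
        PySem.Chars.find_le_length _ _
      set pn := (PySem.Chars.find (text.drop k) pvTag).toNat with hpn
      have hpnlen : pn ≤ (text.drop k).length := by omega
      have hkpn : k + pn ≤ text.length := by
        have := hpnlen; simp only [List.length_drop] at this; omega
      have hstart : (k : Int) + PySem.Chars.find (text.drop k) pvTag = ((k + pn : Nat) : Int) := by
        push_cast; omega
      have hfp : PySem.Chars.find (text.drop k) pvTag = ((pn : Nat) : Int) := by omega
      have hdd : (text.drop k).drop pn = text.drop (k + pn) := by
        rw [List.drop_drop]
      rw [if_neg hp, hstart]
      rw [if_neg (show ¬((k + pn : Nat) : Int) = -1 from by omega)]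
      rw [hfp]
      rw [if_neg (show ¬((pn : Nat) : Int) = -1 from by omega)]
      rw [PySem.Chars.findFrom_natCast text ['\n'] (k + pn) hkpn]
      rw [PySem.Chars.findFrom_natCast (text.drop k) ['\n'] pn hpnlen]
      rw [hdd]
      by_cases hd : PySem.Chars.find (text.drop (k + pn)) ['\n'] = -1
      · simp only [if_pos hd, reduceIte]
        rw [ih text text.length _ le_rfl, List.drop_length]
        have hdrop2 : (text.drop k).drop (text.drop k).length = [] := List.drop_length
        rw [hdrop2]
        simp only [List.length_drop]
        generalize pvF fuel ([] : List Char) = F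
        push_cast
        omega
      · have hdnn : 0 ≤ PySem.Chars.find (text.drop (k + pn)) ['\n'] := by
          have := PySem.Chars.neg_one_le_find (text.drop (k + pn)) ['\n']; omega
        have hdle : PySem.Chars.find (text.drop (k + pn)) ['\n'] ≤ ((text.drop (k + pn)).length : Int) :=
          PySem.Chars.find_le_length _ _
        set dn := (PySem.Chars.find (text.drop (k + pn)) ['\n']).toNat with hdn
        have hkd : k + pn + dn ≤ text.length := by
          have := hdle; simp only [List.length_drop] at this; omega
        have he1 : ((k + pn : Nat) : Int) + PySem.Chars.find (text.drop (k + pn)) ['\n']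
            = ((k + pn + dn : Nat) : Int) := by push_cast; omega
        have he2 : (((pn : Nat) : Int) + PySem.Chars.find (text.drop (k + pn)) ['\n']).toNat
            = pn + dn := by omega
        simp only [if_neg hd]
        rw [he1]
        rw [if_neg (show ¬((k + pn + dn : Nat) : Int) = -1 from by omega)]
        rw [if_neg (show ¬(((pn : Nat) : Int) + PySem.Chars.find (text.drop (k + pn)) ['\n'] = -1) from by omega)]
        rw [he2]
        rw [ih text (k + pn + dn) _ hkd]
        have hdd2 : (text.drop k).drop (pn + dn) = text.drop (k + pn + dn) := by
          rw [List.drop_drop]; congr 1; omega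
        rw [hdd2]
        generalize pvF fuel (text.drop (k + pn + dn)) = F
        push_cast
        omega

lemma pv_fold (L : List (List Char)) (acc : Int) :
    L.foldl (fun acc line =>
      let idx := PySem.Chars.find line pvTag
      if idx ≠ -1 then acc + ((line.length : Int) - idx) else acc) acc = acc + pvG L := by
  have hstep : (fun (acc : Int) (line : List Char) =>
      let idx := PySem.Chars.find line pvTag
      if idx ≠ -1 then acc + ((line.length : Int) - idx) else acc)
      = fun (acc : Int) (line : List Char) => acc + pvLineCount line := by
    funext a line
    simp only [pvLineCount]
    split_ifs with h
    · rfl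
    · omega
  rw [hstep, PySem.List.foldl_add]
  rfl

lemma pv_fallback_eq (text : List Char) :
    pvALoop text (text.length + 1) 0 0 =
      (PySem.Chars.splitOn text ['\n']).foldl
        (fun acc line =>
          let idx := PySem.Chars.find line pvTag
          if idx ≠ -1 then acc + ((line.length : Int) - idx) else acc) 0 := by
  have h0 : pvALoop text (text.length + 1) ((0 : Nat) : Int) 0
      = 0 + pvF (text.length + 1) (text.drop 0) :=
    pv_bridge (text.length + 1) text 0 0 (Nat.zero_le _)
  simp only [Nat.cast_zero, List.drop_zero, zero_add] at h0
  rw [h0, pv_main text.length text (text.length + 1) le_rfl (by omega)]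
  rw [pv_splitOn_eq, pv_fold]
  simp

-- ===== VERDICT (by name: the statement is the Claim_ definition above) =====
theorem summarize_context_quality_spec : Claim_equal_summarize_context_quality := by
  intro context _
  unfold Spec_summarize_context_quality summarize_context_quality summarize_context_quality_alt
  simp only [pv_fallback_eq]
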